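-- pv_equiv track=rewrite | github.com/akashmaji946/VM-Diffing-Tool | frontend/python_scripts/list_all_files_in_disk.py | human_readable_permissions
-- ===== SOURCE A (Python) =====
-- import stat
--
-- def human_readable_permissions(mode):
--     """Convert a file mode to rwxrwxrwx format."""
--     perms = ""
--     for who in [stat.S_IRUSR, stat.S_IWUSR, stat.S_IXUSR,
--                 stat.S_IRGRP, stat.S_IWGRP, stat.S_IXGRP,
--                 stat.S_IROTH, stat.S_IWOTH, stat.S_IXOTH]:
--         perms += (mode & who) and "rwxrwxrwx"[list(bin(who)[2:]).count('1')-1] or "-"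
--     # Alternative simpler approach:
--     perms = ""
--     mapping = [(stat.S_IRUSR,"r"),(stat.S_IWUSR,"w"),(stat.S_IXUSR,"x"),
--                (stat.S_IRGRP,"r"),(stat.S_IWGRP,"w"),(stat.S_IXGRP,"x"),
--                (stat.S_IROTH,"r"),(stat.S_IWOTH,"w"),(stat.S_IXOTH,"x")]
--     for flag, char in mapping:
--         perms += char if mode & flag else "-"
--     return perms
-- ===== SOURCE B (Python) =====
-- def human_readable_permissions(mode):
--     """Convert a file mode to rwxrwxrwx format."""
--     table = ["---", "--x", "-w-", "-wx", "r--", "r-x", "rw-", "rwx"]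
--     return table[(mode >> 6) & 7] + table[(mode >> 3) & 7] + table[mode & 7]
-- ===== Notes on version B (the rewrite author's own statement) =====
-- stated objective: idiomatic
-- what changed: Replaces the dead popcount loop plus the per-flag bit-test loop with a precomputed lookup table indexed by the three octal permission digits extracted via shift-and-mask.
import Mathlib
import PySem

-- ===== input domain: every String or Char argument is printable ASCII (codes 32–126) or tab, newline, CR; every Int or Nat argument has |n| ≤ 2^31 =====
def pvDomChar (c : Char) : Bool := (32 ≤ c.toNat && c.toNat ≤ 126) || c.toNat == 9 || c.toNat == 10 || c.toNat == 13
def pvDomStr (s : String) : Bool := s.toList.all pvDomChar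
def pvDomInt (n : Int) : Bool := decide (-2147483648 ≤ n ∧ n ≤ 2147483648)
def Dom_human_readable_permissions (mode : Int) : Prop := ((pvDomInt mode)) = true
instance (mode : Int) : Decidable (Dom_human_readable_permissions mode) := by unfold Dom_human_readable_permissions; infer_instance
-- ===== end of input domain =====

-- B replaces A's flag-by-flag tests (and A's dead first loop) with an 8-entry table
-- indexed by the three octal permission digits of the mode (idiomatic, not faster).

-- ===== PORT A =====
def pvMappingA : List (Int × Char) :=
  [(256,'r'),(128,'w'),(64,'x'),(32,'r'),(16,'w'),(8,'x'),(4,'r'),(2,'w'),(1,'x')]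

def human_readable_permissions (mode : Int) : String :=
  -- first loop of A (its result is overwritten by the second loop; kept for fidelity)
  let perms : String :=
    ([256,128,64,32,16,8,4,2,1] : List Int).foldl (fun acc who =>
      acc ++ (if PySem.Int.band mode who ≠ 0 then
        (match PySem.Str.pyGet? "rwxrwxrwx" ((PySem.Int.bitCount who : Int) - 1) with
         | some c => String.singleton c
         | none => "-")   -- unreachable: the index is always 0 for these constants
      else "-")) ""
  let _ := perms
  pvMappingA.foldl (fun acc fc =>
    acc ++ (if PySem.Int.band mode fc.1 ≠ 0 then String.singleton fc.2 else "-")) ""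

-- ===== PORT B =====
def pvTableB : List String := ["---","--x","-w-","-wx","r--","r-x","rw-","rwx"]

def human_readable_permissions_alt (mode : Int) : String :=
  PySem.List.pyGetD pvTableB (PySem.Int.band (mode >>> (6:Nat)) 7) ""
    ++ PySem.List.pyGetD pvTableB (PySem.Int.band (mode >>> (3:Nat)) 7) ""
    ++ PySem.List.pyGetD pvTableB (PySem.Int.band mode 7) ""
    -- the index is always in 0..7, so the default "" is unreachable (Python never raises)

-- ===== PRECONDITION & SPEC =====
def Spec_human_readable_permissions (mode : Int) (out : String) : Prop := out = human_readable_permissions_alt mode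
instance (mode : Int) (out : String) : Decidable (Spec_human_readable_permissions mode out) := by unfold Spec_human_readable_permissions; infer_instance

-- ===== CLAIM (what is proved, stated in full; the proofs are below) =====
def Claim_equal_human_readable_permissions : Prop := ∀ (mode : Int), Dom_human_readable_permissions mode → Spec_human_readable_permissions mode (human_readable_permissions mode)

-- ===== LEMMAS AND PROOFS =====

theorem pv_and512 (n f : Nat) (hf : f < 512) : n &&& f = n % 512 &&& f := by
  have hf' : f < 2 ^ 9 := by norm_num at hf ⊢; omega
  have h9 : n % 512 = n % 2 ^ 9 := by norm_num
  rw [h9]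
  apply Nat.eq_of_testBit_eq
  intro j
  rcases lt_or_ge j 9 with h | h
  · simp only [Nat.testBit_and, Nat.testBit_mod_two_pow, h, decide_true, Bool.true_and]
  · have h2 : (2:Nat)^9 ≤ 2^j := Nat.pow_le_pow_right (by norm_num) h
    have : f.testBit j = false := Nat.testBit_eq_false_of_lt (lt_of_lt_of_le hf' h2)
    simp [Nat.testBit_and, this]

theorem pv_and8 (n : Nat) : n &&& 7 = n % 8 := by
  have := Nat.and_two_pow_sub_one_eq_mod n 3
  norm_num at this; omega

theorem pv_band_pos (n f : Nat) : PySem.Int.band (Int.ofNat n) (Int.ofNat f) = Int.ofNat (n &&& f) := by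
  simp [PySem.Int.band, Int.ofNat_eq_natCast]

theorem pv_band_neg (n f : Nat) : PySem.Int.band (Int.negSucc n) (Int.ofNat f) = Int.ofNat (f - (f &&& n)) := by
  simp [PySem.Int.band, Int.negSucc_eq, Int.ofNat_eq_natCast]
  intro h; exfalso; omega

theorem pv_shr_pos (n k : Nat) : (Int.ofNat n) >>> k = Int.ofNat (n >>> k) := by
  simp [Int.ofNat_eq_natCast]

theorem pv_shr_neg (n k : Nat) : (Int.negSucc n) >>> k = Int.negSucc (n >>> k) := rfl

theorem pv_s6 (n : Nat) : (n >>> 6) &&& 7 = ((n % 512) >>> 6) &&& 7 := by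
  rw [Nat.shiftRight_eq_div_pow, Nat.shiftRight_eq_div_pow, pv_and8, pv_and8]
  norm_num; omega

theorem pv_s3 (n : Nat) : (n >>> 3) &&& 7 = ((n % 512) >>> 3) &&& 7 := by
  rw [Nat.shiftRight_eq_div_pow, Nat.shiftRight_eq_div_pow, pv_and8, pv_and8]
  norm_num; omega

theorem pv_litInts : ((256:Int) = Int.ofNat 256 ∧ (128:Int) = Int.ofNat 128 ∧ (64:Int) = Int.ofNat 64 ∧
    (32:Int) = Int.ofNat 32 ∧ (16:Int) = Int.ofNat 16 ∧ (8:Int) = Int.ofNat 8 ∧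
    (4:Int) = Int.ofNat 4 ∧ (2:Int) = Int.ofNat 2 ∧ (1:Int) = Int.ofNat 1 ∧ (7:Int) = Int.ofNat 7) := by
  refine ⟨rfl, rfl, rfl, rfl, rfl, rfl, rfl, rfl, rfl, rfl⟩

theorem pv_A_pos (n : Nat) : human_readable_permissions (Int.ofNat n) = human_readable_permissions (Int.ofNat (n % 512)) := by
  simp only [human_readable_permissions, pvMappingA, List.foldl,
    pv_litInts.1, pv_litInts.2.1, pv_litInts.2.2.1, pv_litInts.2.2.2.1, pv_litInts.2.2.2.2.1,
    pv_litInts.2.2.2.2.2.1, pv_litInts.2.2.2.2.2.2.1, pv_litInts.2.2.2.2.2.2.2.1,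
    pv_litInts.2.2.2.2.2.2.2.2.1, pv_band_pos,
    pv_and512 n 256 (by norm_num), pv_and512 n 128 (by norm_num), pv_and512 n 64 (by norm_num),
    pv_and512 n 32 (by norm_num), pv_and512 n 16 (by norm_num), pv_and512 n 8 (by norm_num),
    pv_and512 n 4 (by norm_num), pv_and512 n 2 (by norm_num), pv_and512 n 1 (by norm_num)]

theorem pv_A_neg (n : Nat) : human_readable_permissions (Int.negSucc n) = human_readable_permissions (Int.negSucc (n % 512)) := by
  simp only [human_readable_permissions, pvMappingA, List.foldl,
    pv_litInts.1, pv_litInts.2.1, pv_litInts.2.2.1, pv_litInts.2.2.2.1, pv_litInts.2.2.2.2.1,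
    pv_litInts.2.2.2.2.2.1, pv_litInts.2.2.2.2.2.2.1, pv_litInts.2.2.2.2.2.2.2.1,
    pv_litInts.2.2.2.2.2.2.2.2.1, pv_band_neg,
    Nat.and_comm 256 n, Nat.and_comm 128 n, Nat.and_comm 64 n, Nat.and_comm 32 n,
    Nat.and_comm 16 n, Nat.and_comm 8 n, Nat.and_comm 4 n, Nat.and_comm 2 n, Nat.and_comm 1 n,
    pv_and512 n 256 (by norm_num), pv_and512 n 128 (by norm_num), pv_and512 n 64 (by norm_num),
    pv_and512 n 32 (by norm_num), pv_and512 n 16 (by norm_num), pv_and512 n 8 (by norm_num),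
    pv_and512 n 4 (by norm_num), pv_and512 n 2 (by norm_num), pv_and512 n 1 (by norm_num),
    Nat.and_comm (n % 512)]

theorem pv_B_pos (n : Nat) : human_readable_permissions_alt (Int.ofNat n) = human_readable_permissions_alt (Int.ofNat (n % 512)) := by
  simp only [human_readable_permissions_alt, pv_litInts.2.2.2.2.2.2.2.2.2,
    pv_shr_pos, pv_band_pos, pv_s6 n, pv_s3 n, pv_and512 n 7 (by norm_num)]

theorem pv_B_neg (n : Nat) : human_readable_permissions_alt (Int.negSucc n) = human_readable_permissions_alt (Int.negSucc (n % 512)) := by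
  simp only [human_readable_permissions_alt, pv_litInts.2.2.2.2.2.2.2.2.2,
    pv_shr_neg, pv_band_neg,
    Nat.and_comm 7 (n >>> 6), Nat.and_comm 7 (n >>> 3), Nat.and_comm 7 n,
    pv_s6 n, pv_s3 n, pv_and512 n 7 (by norm_num),
    Nat.and_comm ((n % 512) >>> 6) 7, Nat.and_comm ((n % 512) >>> 3) 7, Nat.and_comm (n % 512) 7]

set_option maxRecDepth 40000 in
theorem pv_eq_fin_pos : ∀ m : Fin 512, human_readable_permissions (Int.ofNat m.val) = human_readable_permissions_alt (Int.ofNat m.val) := by decide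

set_option maxRecDepth 40000 in
theorem pv_eq_fin_neg : ∀ m : Fin 512, human_readable_permissions (Int.negSucc m.val) = human_readable_permissions_alt (Int.negSucc m.val) := by decide

-- ===== VERDICT (by name: the statement is the Claim_ definition above) =====
theorem human_readable_permissions_spec : Claim_equal_human_readable_permissions := by
  intro mode _
  unfold Spec_human_readable_permissions
  cases mode with
  | ofNat n =>
      rw [pv_A_pos, pv_B_pos]
      exact pv_eq_fin_pos ⟨n % 512, Nat.mod_lt _ (by norm_num)⟩
  | negSucc n =>
      rw [pv_A_neg, pv_B_neg]
      exact pv_eq_fin_neg ⟨n % 512, Nat.mod_lt _ (by norm_num)⟩
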